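-- pv_equiv track=rewrite | github.com/momstouch/programming | codejam/2020_online_1/team_matching.py | solution
-- ===== SOURCE A (Python) =====
-- def solution(n, k, a, b):
--     c = [(i, a[i] - b[i]) for i in range(n)]
--     c.sort(key = lambda x: abs(x[1]))
--
--     ans = 0
--     # diff stands for the counter indicating which group has
--     # more larger value of elements
--     diff = sum([1 if x > 0 else -1 for _, x in c])
--
--     for i, x in c:
--         if k < abs(diff) and x * diff > 0:
--             k += 2
--             ans += min(a[i], b[i])
--         else:
--             ans += max(a[i], b[i])
--
--     return ans
-- ===== SOURCE B (Python) =====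
-- def solution(n, k, a, b):
--     # Closed-form: start from the sum of per-pair maxima, then subtract the
--     # smallest same-sign |a[i]-b[i]| gaps needed to reduce the sign imbalance.
--     diffs = [a[i] - b[i] for i in range(n)]
--     diff = sum(1 if x > 0 else -1 for x in diffs)
--     base = sum(max(a[i], b[i]) for i in range(n))
--     d = abs(diff)
--     if d <= k:
--         return base
--     t = (d - k + 1) // 2
--     m = sorted(abs(x) for x in diffs if x * diff > 0)
--     return base - sum(m[:t])
-- ===== Notes on version B (the rewrite author's own statement) =====
-- stated objective: faster
-- what changed: B replaces A's sort-all-index-pairs-then-simulate loop by a closed form: baseline sum of per-pair maxima minus the sum of the t smallest same-sign gaps |a[i]-b[i]|, with t computed arithmetically from the sign imbalance and k; Pre_ excludes n exceeding a list's length, where A raises IndexError.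
import Mathlib
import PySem

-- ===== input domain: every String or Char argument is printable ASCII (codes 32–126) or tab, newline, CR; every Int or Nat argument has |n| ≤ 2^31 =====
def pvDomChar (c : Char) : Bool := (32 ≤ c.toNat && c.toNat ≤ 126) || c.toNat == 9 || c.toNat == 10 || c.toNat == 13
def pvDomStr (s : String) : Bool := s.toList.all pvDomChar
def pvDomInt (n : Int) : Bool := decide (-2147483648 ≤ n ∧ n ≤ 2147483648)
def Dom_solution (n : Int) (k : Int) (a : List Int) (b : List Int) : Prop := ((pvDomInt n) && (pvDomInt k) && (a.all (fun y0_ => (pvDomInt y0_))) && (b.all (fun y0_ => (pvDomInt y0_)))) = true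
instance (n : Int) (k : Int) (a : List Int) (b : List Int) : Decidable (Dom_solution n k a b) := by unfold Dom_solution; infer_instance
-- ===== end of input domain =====

-- B computes A's answer in closed form: baseline sum of maxima minus the smallest
-- same-sign gaps, instead of sorting all index pairs and simulating the greedy loop.


-- ===== PORT A =====
def solution (n : Int) (k : Int) (a : List Int) (b : List Int) : Int :=
  let c := (PySem.List.pyRange 0 n 1).map
    (fun i => (i, PySem.List.pyGetD a i 0 - PySem.List.pyGetD b i 0))
  let c := PySem.List.sorted c (fun x => |x.2|) false
  let diff := (c.map (fun p => if p.2 > 0 then (1 : Int) else -1)).sum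
  let st := c.foldl
    (fun (st : Int × Int) p =>
      if st.1 < |diff| ∧ p.2 * diff > 0 then
        (st.1 + 2, st.2 + min (PySem.List.pyGetD a p.1 0) (PySem.List.pyGetD b p.1 0))
      else
        (st.1, st.2 + max (PySem.List.pyGetD a p.1 0) (PySem.List.pyGetD b p.1 0)))
    (k, 0)
  st.2

-- ===== PORT B =====
def solution_alt (n : Int) (k : Int) (a : List Int) (b : List Int) : Int :=
  let diffs := (PySem.List.pyRange 0 n 1).map
    (fun i => PySem.List.pyGetD a i 0 - PySem.List.pyGetD b i 0)
  let diff := (diffs.map (fun x => if x > 0 then (1 : Int) else -1)).sum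
  let base := ((PySem.List.pyRange 0 n 1).map
    (fun i => max (PySem.List.pyGetD a i 0) (PySem.List.pyGetD b i 0))).sum
  let d := |diff|
  if d ≤ k then base
  else
    let t := PySem.Int.floordiv (d - k + 1) 2
    let m := PySem.List.sorted ((diffs.filter (fun x => x * diff > 0)).map (fun x => |x|))
      (fun x => x) false
    base - (PySem.List.slice m none (some t)).sum

-- ===== PRECONDITION & SPEC =====
-- Pre_ excludes exactly the inputs where A raises IndexError (n larger than a list's length).
def Pre_solution (n : Int) (k : Int) (a : List Int) (b : List Int) : Prop :=
  n ≤ (a.length : Int) ∧ n ≤ (b.length : Int)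
instance (n : Int) (k : Int) (a : List Int) (b : List Int) : Decidable (Pre_solution n k a b) := by unfold Pre_solution; infer_instance
def pvWitness_solution : Int × Int × List Int × List Int := (2, 0, [3, 1], [1, 2])

def Spec_solution (n : Int) (k : Int) (a : List Int) (b : List Int) (out : Int) : Prop := out = solution_alt n k a b
instance (n : Int) (k : Int) (a : List Int) (b : List Int) (out : Int) : Decidable (Spec_solution n k a b out) := by unfold Spec_solution; infer_instance

-- ===== CLAIM (what is proved, stated in full; the proofs are below) =====
def Claim_equal_solution : Prop := ∀ (n : Int) (k : Int) (a : List Int) (b : List Int), Dom_solution n k a b → Pre_solution n k a b → Spec_solution n k a b (solution n k a b)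

-- ===== LEMMAS AND PROOFS =====

-- the amount A subtracts once the k-counter is simulated on the matching gaps, in order
def swm (d : Int) : Int → List Int → Int
  | _, [] => 0
  | k, x :: xs => if k < d then x + swm d (k + 2) xs else swm d k xs

-- number of gaps A switches from max to min, as a closed form
def Tn (d k : Int) : Nat := if k < d then ((d - k + 1) / 2).toNat else 0

lemma swm_eq_take (d : Int) (xs : List Int) : ∀ k, swm d k xs = (xs.take (Tn d k)).sum := by
  induction xs with
  | nil => intro k; simp [swm]
  | cons x xs ih =>
    intro k
    by_cases h : k < d
    · have h1 : Tn d k = Tn d (k + 2) + 1 := by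
        unfold Tn; split_ifs <;> omega
      simp only [swm, if_pos h, h1, List.take_succ_cons, List.sum_cons, ih (k + 2)]
    · have h0 : Tn d k = 0 := by unfold Tn; rw [if_neg h]
      rw [show swm d k (x :: xs) = swm d k xs from by simp [swm, if_neg h], ih k, h0]
      simp

lemma swm_cons_pos {d k x : Int} {xs : List Int} (h : k < d) :
    swm d k (x :: xs) = x + swm d (k + 2) xs := by simp [swm, h]

lemma swm_cons_neg {d k x : Int} {xs : List Int} (h : ¬ k < d) :
    swm d k (x :: xs) = swm d k xs := by simp [swm, h]

lemma foldl_step (a b : List Int) (diff : Int) :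
    ∀ (l : List (Int × Int)),
      (∀ p ∈ l, p.2 = PySem.List.pyGetD a p.1 0 - PySem.List.pyGetD b p.1 0) →
      ∀ k s,
      (l.foldl
        (fun (st : Int × Int) p =>
          if st.1 < |diff| ∧ p.2 * diff > 0 then
            (st.1 + 2, st.2 + min (PySem.List.pyGetD a p.1 0) (PySem.List.pyGetD b p.1 0))
          else
            (st.1, st.2 + max (PySem.List.pyGetD a p.1 0) (PySem.List.pyGetD b p.1 0)))
        (k, s)).2
      = s + (l.map (fun p => max (PySem.List.pyGetD a p.1 0) (PySem.List.pyGetD b p.1 0))).sum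
          - swm |diff| k ((l.filter (fun p => decide (p.2 * diff > 0))).map (fun p => |p.2|)) := by
  intro l
  induction l with
  | nil => intro _ k s; simp [swm]
  | cons p l ih =>
    intro hmem k s
    have hp := hmem p (List.mem_cons_self ..)
    have hl : ∀ q ∈ l, q.2 = PySem.List.pyGetD a q.1 0 - PySem.List.pyGetD b q.1 0 :=
      fun q hq => hmem q (List.mem_cons_of_mem _ hq)
    by_cases hm : p.2 * diff > 0
    · have hfil : List.filter (fun p => decide (p.2 * diff > 0)) (p :: l)
          = p :: List.filter (fun p => decide (p.2 * diff > 0)) l :=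
        List.filter_cons_of_pos (by simpa using hm)
      by_cases hk : k < |diff|
      · have hcond : ((k, s).1 < |diff| ∧ p.2 * diff > 0) := ⟨hk, hm⟩
        have hmin : min (PySem.List.pyGetD a p.1 0) (PySem.List.pyGetD b p.1 0)
            = max (PySem.List.pyGetD a p.1 0) (PySem.List.pyGetD b p.1 0) - |p.2| := by
          rw [hp]
          rcases le_total (PySem.List.pyGetD a p.1 0) (PySem.List.pyGetD b p.1 0) with h | h
          · rw [min_eq_left h, max_eq_right h, abs_of_nonpos (by omega)]; ring
          · rw [min_eq_right h, max_eq_left h, abs_of_nonneg (by omega)]; ring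
        rw [List.foldl_cons, if_pos hcond, ih hl, hfil, List.map_cons, List.sum_cons,
          List.map_cons, swm_cons_pos hk, hmin]
        ring
      · have hcond : ¬ ((k, s).1 < |diff| ∧ p.2 * diff > 0) := by
          simp only [not_and]; intro h; exact absurd h hk
        rw [List.foldl_cons, if_neg hcond, ih hl, hfil, List.map_cons, List.sum_cons,
          List.map_cons, swm_cons_neg hk]
        ring
    · have hcond : ¬ ((k, s).1 < |diff| ∧ p.2 * diff > 0) := by
        simp only [not_and]; intro _; exact hm
      have hfil : List.filter (fun p => decide (p.2 * diff > 0)) (p :: l)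
          = List.filter (fun p => decide (p.2 * diff > 0)) l :=
        List.filter_cons_of_neg (by simpa using hm)
      rw [List.foldl_cons, if_neg hcond, ih hl, hfil, List.map_cons, List.sum_cons]
      ring

lemma swm_zero {d k : Int} (h : ¬ k < d) (xs : List Int) : swm d k xs = 0 := by
  rw [swm_eq_take, show Tn d k = 0 from by unfold Tn; rw [if_neg h]]
  simp

-- ===== VERDICT (by name: the statement is the Claim_ definition above) =====
theorem solution_spec : Claim_equal_solution := by
  intro n k a b _ _
  unfold Spec_solution
  simp only [solution, solution_alt]
  set f : Int → Int × Int := fun i => (i, PySem.List.pyGetD a i 0 - PySem.List.pyGetD b i 0) with hf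
  set h : Int → Int := fun i => PySem.List.pyGetD a i 0 - PySem.List.pyGetD b i 0 with hh
  set r := PySem.List.pyRange 0 n 1 with hr
  set c0 := r.map f with hc0
  set c := PySem.List.sorted c0 (fun x => |x.2|) false with hc
  have hperm : c.Perm c0 := PySem.List.sorted_perm c0 (fun x => |x.2|) false
  set g : Int × Int → Int := fun p => if p.2 > 0 then (1 : Int) else -1 with hg
  set gg : Int → Int := fun x => if x > 0 then (1 : Int) else -1 with hgg
  have hdiff : (c.map g).sum = ((r.map h).map gg).sum := by
    rw [(hperm.map g).sum_eq, hc0]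
    simp only [List.map_map]
    rfl
  set D := ((r.map h).map gg).sum with hD
  rw [hdiff]
  have hmem : ∀ p ∈ c, p.2 = PySem.List.pyGetD a p.1 0 - PySem.List.pyGetD b p.1 0 := by
    intro p hp
    have hp0 : p ∈ c0 := hperm.mem_iff.mp hp
    rw [hc0] at hp0
    obtain ⟨i, _, hi⟩ := List.mem_map.mp hp0
    rw [← hi]
  rw [foldl_step a b D c hmem k 0]
  have hbase : (c.map (fun p => max (PySem.List.pyGetD a p.1 0) (PySem.List.pyGetD b p.1 0))).sum
      = (r.map (fun i => max (PySem.List.pyGetD a i 0) (PySem.List.pyGetD b i 0))).sum := by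
    rw [(hperm.map _).sum_eq, hc0, List.map_map]
    rfl
  rw [hbase, zero_add]
  by_cases hdk : |D| ≤ k
  · rw [if_pos hdk, swm_zero (by omega), sub_zero]
  · rw [if_neg hdk]
    -- the two gap lists: A's filtered sorted pairs and B's sorted filtered gaps coincide
    have hvals : ((c.filter (fun p => decide (p.2 * D > 0))).map (fun p => |p.2|))
        = PySem.List.sorted (((r.map h).filter (fun x => decide (x * D > 0))).map (fun x => |x|))
            (fun x => x) false := by
      have hpm : ((c.filter (fun p => decide (p.2 * D > 0))).map (fun p => (|p.2| : Int))).Perm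
          (PySem.List.sorted (((r.map h).filter (fun x => decide (x * D > 0))).map (fun x => |x|))
            (fun x => x) false) := by
        have e : ((c0.filter (fun p => decide (p.2 * D > 0))).map (fun p => (|p.2| : Int)))
            = ((r.map h).filter (fun x => decide (x * D > 0))).map (fun x => |x|) := by
          rw [hc0, List.filter_map, List.map_map, List.filter_map, List.map_map]
          rfl
        refine ((hperm.filter _).map _).trans ?_
        rw [e]
        exact (PySem.List.sorted_perm _ _ _).symm
      refine PySem.List.eq_of_perm_of_pairwise_le_of_injective (fun x : Int => x)
        (fun _ _ hxy => hxy) hpm ?_ ?_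
      · exact List.pairwise_map.mpr
          (List.Pairwise.filter _ (PySem.List.sorted_pairwise c0 (fun x => |x.2|)))
      · exact PySem.List.sorted_pairwise _ (fun x => x)
    rw [hvals, swm_eq_take]
    rw [PySem.Int.floordiv_eq_ediv_of_pos (by omega : (0:Int) < 2)]
    have hb : (0 : Int) ≤ (|D| - k + 1) / 2 := by omega
    rw [PySem.List.slice_to _ hb]
    rw [show Tn |D| k = ((|D| - k + 1) / 2).toNat from by unfold Tn; rw [if_pos (by omega)]]
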